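-- pv_equiv track=rewrite | github.com/NIKHIL0-0/pdf-rearranger | modules/page_numbers.py | detect_missing_pages
-- ===== SOURCE A (Python) =====
-- def detect_missing_pages(pages_with_numbers):
--     """
--     Detect missing pages based on page number sequence.
--     Returns list of missing page numbers.
--
--     Args:
--         pages_with_numbers: List of tuples [(page_index, page_number), ...]
--     """
--     if len(pages_with_numbers) < 2:
--         return []
--
--     # Sort by detected page number
--     sorted_pages = sorted(pages_with_numbers, key=lambda x: x[1])
--     page_numbers = [pn for _, pn in sorted_pages]
--
--     missing = []
--     for i in range(len(page_numbers) - 1):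
--         current = page_numbers[i]
--         next_num = page_numbers[i + 1]
--
--         # Check for gaps in sequence
--         if next_num - current > 1:
--             missing.extend(range(current + 1, next_num))
--
--     return missing
-- ===== SOURCE B (Python) =====
-- def detect_missing_pages(pages_with_numbers):
--     if len(pages_with_numbers) < 2:
--         return []
--     present = set(pn for _, pn in pages_with_numbers)
--     lo, hi = min(present), max(present)
--     return [n for n in range(lo + 1, hi) if n not in present]
-- ===== Notes on version B (the rewrite author's own statement) =====
-- stated objective: simpler
-- what changed: Replaces the sort-then-scan-adjacent-pairs algorithm with a set of present numbers plus one walk over the integer interval (min, max), collecting the absent numbers.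
import Mathlib
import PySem

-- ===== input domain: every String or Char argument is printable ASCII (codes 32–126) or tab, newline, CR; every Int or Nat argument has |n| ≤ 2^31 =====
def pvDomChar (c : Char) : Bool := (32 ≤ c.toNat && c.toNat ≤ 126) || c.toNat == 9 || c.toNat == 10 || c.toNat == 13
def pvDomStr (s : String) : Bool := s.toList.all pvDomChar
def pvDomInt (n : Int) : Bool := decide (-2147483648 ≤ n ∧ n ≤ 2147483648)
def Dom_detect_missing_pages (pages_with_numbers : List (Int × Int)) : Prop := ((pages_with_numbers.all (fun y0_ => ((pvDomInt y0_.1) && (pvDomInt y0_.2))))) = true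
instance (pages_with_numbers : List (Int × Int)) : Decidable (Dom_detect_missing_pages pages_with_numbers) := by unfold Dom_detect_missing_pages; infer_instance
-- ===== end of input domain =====

-- B replaces A's sort-and-scan-adjacent-pairs with a membership set walked over the interval (min, max): simpler, no sorting.

-- ===== PORT A =====
def detect_missing_pages (pages_with_numbers : List (Int × Int)) : List Int :=
  if pages_with_numbers.length < 2 then []
  else
    let sorted_pages := PySem.List.sorted pages_with_numbers (fun x => x.2) false
    let page_numbers := sorted_pages.map (fun x => x.2)
    (PySem.List.pyRange 0 ((page_numbers.length : Int) - 1) 1).foldl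
      (fun missing i =>
        let current := PySem.List.pyGetD page_numbers i 0
        let next_num := PySem.List.pyGetD page_numbers (i + 1) 0
        if next_num - current > 1 then missing ++ PySem.List.pyRange (current + 1) next_num 1
        else missing)
      []

-- ===== PORT B =====
def detect_missing_pages_alt (pages_with_numbers : List (Int × Int)) : List Int :=
  if pages_with_numbers.length < 2 then []
  else
    let present : PySem.Set Int := PySem.Set.ofList (pages_with_numbers.map (fun x => x.2))
    match PySem.List.min? present (fun x => x), PySem.List.max? present (fun x => x) with
    | some lo, some hi =>
        (PySem.List.pyRange (lo + 1) hi 1).filter (fun n => !(PySem.Set.contains present n))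
    | _, _ => []  -- unreachable: present is nonempty when the guard passed

-- ===== PRECONDITION & SPEC =====
def Spec_detect_missing_pages (pages_with_numbers : List (Int × Int)) (out : List Int) : Prop := out = detect_missing_pages_alt pages_with_numbers
instance (pages_with_numbers : List (Int × Int)) (out : List Int) : Decidable (Spec_detect_missing_pages pages_with_numbers out) := by unfold Spec_detect_missing_pages; infer_instance

-- ===== CLAIM (what is proved, stated in full; the proofs are below) =====
def Claim_equal_detect_missing_pages : Prop := ∀ (pages_with_numbers : List (Int × Int)), Dom_detect_missing_pages pages_with_numbers → Spec_detect_missing_pages pages_with_numbers (detect_missing_pages pages_with_numbers)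

-- ===== LEMMAS AND PROOFS =====

-- the gap contribution of adjacent sorted entries, as a structural recursion
def gaps : List Int → List Int
  | [] => []
  | [_] => []
  | a :: b :: r => (if b - a > 1 then PySem.List.pyRange (a + 1) b 1 else []) ++ gaps (b :: r)

def gidx (s : List Int) (k : Nat) : List Int :=
  if s.getD (k + 1) 0 - s.getD k 0 > 1 then PySem.List.pyRange (s.getD k 0 + 1) (s.getD (k + 1) 0) 1 else []

lemma flat_gidx : ∀ (s : List Int), (List.range (s.length - 1)).flatMap (gidx s) = gaps s := by
  intro s
  induction s with
  | nil => simp [gaps]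
  | cons a t ih =>
    cases t with
    | nil => simp [gaps]
    | cons b r =>
      have hlen : (a :: b :: r).length - 1 = ((b :: r).length - 1) + 1 := by
        simp
      rw [hlen, List.range_succ_eq_map, List.flatMap_cons, List.flatMap_map]
      have hshift : ∀ k : Nat, gidx (a :: b :: r) (k + 1) = gidx (b :: r) k := by
        intro k; simp [gidx]
      have : (List.range ((b :: r).length - 1)).flatMap (fun k => gidx (a :: b :: r) (k + 1))
           = (List.range ((b :: r).length - 1)).flatMap (gidx (b :: r)) := by
        apply List.flatMap_congr; intro k _; exact hshift k
      rw [this, ih]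
      simp [gaps, gidx]

lemma loopA (s : List Int) :
    (PySem.List.pyRange 0 ((s.length : Int) - 1) 1).foldl
      (fun missing i =>
        if PySem.List.pyGetD s (i + 1) 0 - PySem.List.pyGetD s i 0 > 1
        then missing ++ PySem.List.pyRange (PySem.List.pyGetD s i 0 + 1) (PySem.List.pyGetD s (i + 1) 0) 1
        else missing)
      [] = gaps s := by
  have h1 : (PySem.List.pyRange 0 ((s.length : Int) - 1) 1).foldl
      (fun missing i =>
        if PySem.List.pyGetD s (i + 1) 0 - PySem.List.pyGetD s i 0 > 1
        then missing ++ PySem.List.pyRange (PySem.List.pyGetD s i 0 + 1) (PySem.List.pyGetD s (i + 1) 0) 1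
        else missing)
      []
      = (PySem.List.pyRange 0 ((s.length : Int) - 1) 1).foldl
        (fun missing i => missing ++
          (if PySem.List.pyGetD s (i + 1) 0 - PySem.List.pyGetD s i 0 > 1
           then PySem.List.pyRange (PySem.List.pyGetD s i 0 + 1) (PySem.List.pyGetD s (i + 1) 0) 1
           else [])) [] := by
    apply PySem.List.foldl_congr_mem
    intro acc x _
    by_cases h : PySem.List.pyGetD s (x + 1) 0 - PySem.List.pyGetD s x 0 > 1 <;> simp [h]
  rw [h1, PySem.List.foldl_append_eq_flatMap, List.nil_append]
  rw [PySem.List.pyRange_one]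
  rw [List.flatMap_map]
  have h2 : ((s.length : Int) - 1 - 0).toNat = s.length - 1 := by omega
  rw [h2]
  have h3 : ∀ k : Nat, (if PySem.List.pyGetD s ((0:Int) + k + 1) 0 - PySem.List.pyGetD s ((0:Int) + k) 0 > 1
      then PySem.List.pyRange (PySem.List.pyGetD s ((0:Int) + k) 0 + 1) (PySem.List.pyGetD s ((0:Int) + k + 1) 0) 1
      else []) = gidx s k := by
    intro k
    have e2 : ((0:Int) + k + 1) = (((k + 1 : Nat)) : Int) := by omega
    have e1 : ((0:Int) + k) = ((k : Nat) : Int) := by omega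
    rw [e2, e1, PySem.List.pyGetD_natCast, PySem.List.pyGetD_natCast]
    rfl
  exact (List.flatMap_congr (fun k _ => h3 k)).trans (flat_gidx s)

lemma pairwise_le_getLast : ∀ (s : List Int) (h : s ≠ []), s.Pairwise (· ≤ ·) →
    ∀ x ∈ s, x ≤ s.getLast h := by
  intro s
  induction s with
  | nil => intro h; exact absurd rfl h
  | cons a t ih =>
    intro _ hp x hx
    cases t with
    | nil => simp at hx; simp [hx]
    | cons b r =>
      rw [List.getLast_cons (by simp)]
      rw [List.mem_cons] at hx
      rcases hx with rfl | hx
      · have hL : (b :: r).getLast (by simp) ∈ b :: r := List.getLast_mem _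
        exact (List.pairwise_cons.mp hp).1 _ hL
      · exact ih (by simp) (List.pairwise_cons.mp hp).2 x hx

lemma gaps_sorted : ∀ (s : List Int), s.Pairwise (· ≤ ·) → ∀ (h : s ≠ []),
    gaps s = (PySem.List.pyRange (s.head h + 1) (s.getLast h) 1).filter (fun n => !decide (n ∈ s)) := by
  intro s
  induction s with
  | nil => intro _ h; exact absurd rfl h
  | cons a t ih =>
    intro hp h
    cases t with
    | nil => simp [gaps, PySem.List.pyRange_one_eq_nil (show (a : Int) ≤ a + 1 by omega)]
    | cons b r =>
      have hab : a ≤ b := (List.pairwise_cons.mp hp).1 b (by simp)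
      have hp' : (b :: r).Pairwise (· ≤ ·) := (List.pairwise_cons.mp hp).2
      have hb_all : ∀ x ∈ b :: r, b ≤ x := by
        intro x hx
        rw [List.mem_cons] at hx
        rcases hx with rfl | hx
        · exact le_refl x
        · exact (List.pairwise_cons.mp hp').1 x hx
      have hL : (b :: r).getLast (by simp) ∈ b :: r := List.getLast_mem _
      have hbL : b ≤ (b :: r).getLast (by simp) := hb_all _ hL
      have hlast : (a :: b :: r).getLast h = (b :: r).getLast (by simp) := List.getLast_cons (by simp)
      have hhead : (a :: b :: r).head h = a := rfl
      set L := (b :: r).getLast (by simp : (b :: r) ≠ []) with hLdef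
      have hIH := ih hp' (by simp)
      have hIHhead : (b :: r).head (by simp) = b := rfl
      rw [hIHhead] at hIH
      show (if b - a > 1 then PySem.List.pyRange (a + 1) b 1 else []) ++ gaps (b :: r)
          = (PySem.List.pyRange ((a :: b :: r).head h + 1) ((a :: b :: r).getLast h) 1).filter
              (fun n => !decide (n ∈ a :: b :: r))
      rw [hlast, hhead, hIH]
      by_cases hc : a + 1 ≤ b
      · -- a < b : split the interval at b
        have hif : (if b - a > 1 then PySem.List.pyRange (a + 1) b 1 else [])
            = PySem.List.pyRange (a + 1) b 1 := by
          by_cases hg : b - a > 1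
          · simp [hg]
          · rw [if_neg hg, PySem.List.pyRange_one_eq_nil (by omega)]
        rw [hif, PySem.List.pyRange_one_append _ _ _ hc hbL, List.filter_append]
        congr 1
        · -- everything strictly between a and b is absent from the list
          symm
          apply List.filter_eq_self.mpr
          intro n hn
          have hn' : a + 1 ≤ n ∧ n < b := (PySem.List.mem_pyRange_one).mp hn
          simp only [Bool.not_eq_eq_eq_not, Bool.not_true, decide_eq_false_iff_not]
          intro hmem
          rw [List.mem_cons] at hmem
          rcases hmem with rfl | hmem
          · omega
          · have := hb_all n hmem; omega
        · -- the part from b on: b itself is present; above b, membership of a is irrelevant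
          by_cases hcl : b < L
          · rw [PySem.List.pyRange_one_cons hcl]
            have hbmem : (!decide (b ∈ a :: b :: r)) = false := by simp
            rw [List.filter_cons, hbmem]
            simp only [Bool.false_eq_true, if_neg (by simp : ¬False)]
            apply List.filter_congr
            intro n hn
            have hn' : b + 1 ≤ n ∧ n < L := (PySem.List.mem_pyRange_one).mp hn
            have hna : n ≠ a := by omega
            simp [List.mem_cons, hna]
          · have hbl : b = L := by omega
            rw [PySem.List.pyRange_one_eq_nil (by omega : L ≤ b),
                PySem.List.pyRange_one_eq_nil (by omega : L ≤ b + 1)]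
            simp
      · -- a = b : the head is a duplicate, nothing changes
        have hba : b = a := by omega
        have hif : (if b - a > 1 then PySem.List.pyRange (a + 1) b 1 else []) = [] := by
          rw [if_neg (by omega)]
        rw [hif, List.nil_append]
        subst hba
        apply List.filter_congr
        intro n _
        have hiff : (n ∈ b :: b :: r) ↔ (n ∈ b :: r) := by simp [List.mem_cons]
        simp [hiff]

lemma mem_s_iff (p : List (Int × Int)) (n : Int) :
    n ∈ (PySem.List.sorted p (fun x => x.2) false).map (fun x => x.2) ↔ n ∈ p.map (fun x => x.2) := by
  simp only [List.mem_map]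
  constructor
  · rintro ⟨y, hy, rfl⟩
    exact ⟨y, (PySem.List.mem_sorted _ _ _ _).mp hy, rfl⟩
  · rintro ⟨y, hy, rfl⟩
    exact ⟨y, (PySem.List.mem_sorted _ _ _ _).mpr hy, rfl⟩

-- ===== VERDICT (by name: the statement is the Claim_ definition above) =====
theorem detect_missing_pages_spec : Claim_equal_detect_missing_pages := by
  intro p _
  unfold Spec_detect_missing_pages
  by_cases hlen : p.length < 2
  · simp [detect_missing_pages, detect_missing_pages_alt, hlen]
  · set s := (PySem.List.sorted p (fun x => x.2) false).map (fun x => x.2) with hs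
    have hslen : s.length = p.length := by
      rw [hs, List.length_map, PySem.List.length_sorted]
    have hsne : s ≠ [] := by
      intro hnil; rw [hnil] at hslen; simp at hslen; omega
    have hpair : s.Pairwise (· ≤ ·) := PySem.List.sorted_map_key_pairwise _ _
    set nums := p.map (fun x => x.2) with hnums
    set present := PySem.Set.ofList nums with hpresent
    have hmem_pres : ∀ n : Int, n ∈ present ↔ n ∈ s := by
      intro n
      rw [hpresent, PySem.Set.mem_ofList, hnums, hs, mem_s_iff]
    have hpresne : present ≠ [] := by
      intro hnil
      have hh : s.head hsne ∈ s := List.head_mem hsne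
      have := (hmem_pres (s.head hsne)).mpr hh
      rw [hnil] at this; simp at this
    obtain ⟨lo, hlo⟩ : ∃ lo, PySem.List.min? present (fun x => x) = some lo := by
      cases hmin : PySem.List.min? present (fun x => x) with
      | none => exact absurd ((PySem.List.min?_eq_none_iff _ _).mp hmin) hpresne
      | some lo => exact ⟨lo, rfl⟩
    obtain ⟨hi, hhi⟩ : ∃ hi, PySem.List.max? present (fun x => x) = some hi := by
      cases hmax : PySem.List.max? present (fun x => x) with
      | none => exact absurd ((PySem.List.max?_eq_none_iff _ _).mp hmax) hpresne
      | some hi => exact ⟨hi, rfl⟩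
    have hcons : s.head hsne :: s.tail = s := List.cons_head_tail hsne
    have hhead_all : ∀ x ∈ s, s.head hsne ≤ x := by
      intro x hx
      rw [← hcons] at hx
      have hp2 : (s.head hsne :: s.tail).Pairwise (· ≤ ·) := by rw [hcons]; exact hpair
      rw [List.mem_cons] at hx
      rcases hx with rfl | hx
      · exact le_refl _
      · exact (List.pairwise_cons.mp hp2).1 x hx
    have hlo_eq : lo = s.head hsne := by
      have h1 : lo ∈ s := (hmem_pres lo).mp (PySem.List.min?_mem hlo)
      have h2 : lo ≤ s.head hsne :=
        PySem.List.min?_isMin hlo _ ((hmem_pres _).mpr (List.head_mem hsne))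
      have h3 : s.head hsne ≤ lo := hhead_all lo h1
      omega
    have hhi_eq : hi = s.getLast hsne := by
      have h1 : hi ∈ s := (hmem_pres hi).mp (PySem.List.max?_mem hhi)
      have h2 : s.getLast hsne ≤ hi :=
        PySem.List.max?_isMax hhi _ ((hmem_pres _).mpr (List.getLast_mem hsne))
      have h3 : hi ≤ s.getLast hsne := pairwise_le_getLast s hsne hpair hi h1
      omega
    have hB : detect_missing_pages_alt p
        = (PySem.List.pyRange (lo + 1) hi 1).filter (fun n => !(PySem.Set.contains present n)) := by
      rw [detect_missing_pages_alt, if_neg hlen, ← hnums, ← hpresent]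
      dsimp only
      rw [hlo, hhi]
    have hA : detect_missing_pages p
        = (PySem.List.pyRange 0 ((s.length : Int) - 1) 1).foldl
            (fun missing i =>
              if PySem.List.pyGetD s (i + 1) 0 - PySem.List.pyGetD s i 0 > 1
              then missing ++ PySem.List.pyRange (PySem.List.pyGetD s i 0 + 1) (PySem.List.pyGetD s (i + 1) 0) 1
              else missing)
            [] := by
      rw [detect_missing_pages, if_neg hlen]
    rw [hA, hB, loopA s, gaps_sorted s hpair hsne, hlo_eq, hhi_eq]
    apply List.filter_congr
    intro n _
    have hco : PySem.Set.contains present n = decide (n ∈ s) := by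
      by_cases hmem : n ∈ s
      · simp [PySem.Set.contains, (hmem_pres n).mpr hmem, hmem]
      · have hnp : n ∉ present := fun hcx => hmem ((hmem_pres n).mp hcx)
        simp [PySem.Set.contains, hnp, hmem]
    rw [hco]
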